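-- pv_equiv track=rewrite | github.com/ChaseSinify/Hackerrank | missing_numbers.py | missingNumbers
-- ===== SOURCE A (Python) =====
-- from collections import Counter
--
-- def missingNumbers(arr, brr):
--     a = Counter(arr)
--     b = Counter(brr)
--     missing = []
--     for k in b.keys():
--         if k not in a.keys(): #if num from b not in a, consider missing
--             missing.append(k)
--         elif b[k] > a[k]: #if there are more of this num in b than a, consider missing
--             missing.append(k)
--     return sorted(missing) #answer must be sorted
-- ===== SOURCE B (Python) =====
-- def missingNumbers(arr, brr):
--     sa = sorted(arr)
--     sb = sorted(brr)
--     res = []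
--     i = 0
--     j = 0
--     while j < len(sb):
--         v = sb[j]
--         cb = 0
--         while j < len(sb) and sb[j] == v:
--             cb += 1
--             j += 1
--         while i < len(sa) and sa[i] < v:
--             i += 1
--         ca = 0
--         while i < len(sa) and sa[i] == v:
--             ca += 1
--             i += 1
--         if cb > ca:
--             res.append(v)
--     return res
-- ===== Notes on version B (the rewrite author's own statement) =====
-- stated objective: alternative
-- what changed: Replaces the two Counter hash tables and the key loop with a two-pointer grouped scan over sorted copies of arr and brr, emitting each distinct value whose run in brr is longer than in arr; the output comes out already sorted, so the final sort disappears.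
import Mathlib
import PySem

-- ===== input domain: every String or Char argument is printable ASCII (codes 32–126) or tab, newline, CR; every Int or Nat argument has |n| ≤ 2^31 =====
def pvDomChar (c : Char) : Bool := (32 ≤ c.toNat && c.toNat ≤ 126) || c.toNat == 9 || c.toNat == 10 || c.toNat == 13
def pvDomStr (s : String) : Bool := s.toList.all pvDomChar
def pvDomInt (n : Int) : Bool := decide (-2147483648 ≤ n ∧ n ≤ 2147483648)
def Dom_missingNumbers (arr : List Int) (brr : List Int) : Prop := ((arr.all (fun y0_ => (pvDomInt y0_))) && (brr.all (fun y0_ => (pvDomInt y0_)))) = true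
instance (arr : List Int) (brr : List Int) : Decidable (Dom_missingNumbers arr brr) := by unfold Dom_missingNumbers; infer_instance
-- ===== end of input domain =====

-- B replaces A's two Counter dicts + key loop + final sort by a two-pointer
-- grouped scan over sorted copies of both lists (output is emitted in order).

-- ===== PORT A =====
def missingNumbers (arr : List Int) (brr : List Int) : List Int :=
  let a := PySem.Dict.counter arr
  let b := PySem.Dict.counter brr
  let missing := b.keys.foldl (fun missing k =>
    if !(a.contains k) then missing ++ [k]
    else if b.getD k 0 > a.getD k 0 then missing ++ [k]
    else missing) []
  PySem.List.sorted missing (fun x => x) false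

-- ===== PORT B =====
-- inner while `while j < len(sb) and sb[j] == v: cb += 1; j += 1` (run length at the front)
def pvRunLen (v : Int) : List Int → Nat
  | [] => 0
  | x :: t => if x == v then pvRunLen v t + 1 else 0

-- inner while `while i < len(sa) and sa[i] < v: i += 1` (skip the elements below v)
def pvSkipLt (v : Int) : List Int → List Int
  | [] => []
  | x :: t => if x < v then pvSkipLt v t else x :: t

-- advancing the pointer past the run of v
def pvSkipEq (v : Int) : List Int → List Int
  | [] => []
  | x :: t => if x == v then pvSkipEq v t else x :: t

theorem pvSkipEq_length_le (v : Int) : ∀ t : List Int, (pvSkipEq v t).length ≤ t.length := by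
  intro t
  induction t with
  | nil => simp [pvSkipEq]
  | cons x t ih =>
    by_cases h : x == v
    · simp [pvSkipEq, h]; omega
    · simp [pvSkipEq, h]

-- the outer while loop, on the suffixes of the two sorted lists
def pvScan (sa : List Int) : List Int → List Int
  | [] => []
  | v :: t =>
    let cb := pvRunLen v t + 1
    let sa1 := pvSkipLt v sa
    let ca := pvRunLen v sa1
    let sa2 := pvSkipEq v sa1
    let rest := pvScan sa2 (pvSkipEq v t)
    if cb > ca then v :: rest else rest
termination_by sb => sb.length
decreasing_by simpa using Nat.lt_succ_of_le (pvSkipEq_length_le v t)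

def missingNumbers_alt (arr : List Int) (brr : List Int) : List Int :=
  pvScan (PySem.List.sorted arr (fun x => x) false) (PySem.List.sorted brr (fun x => x) false)

-- ===== PRECONDITION & SPEC =====
def Spec_missingNumbers (arr : List Int) (brr : List Int) (out : List Int) : Prop := out = missingNumbers_alt arr brr
instance (arr : List Int) (brr : List Int) (out : List Int) : Decidable (Spec_missingNumbers arr brr out) := by unfold Spec_missingNumbers; infer_instance

-- ===== CLAIM (what is proved, stated in full; the proofs are below) =====
def Claim_equal_missingNumbers : Prop := ∀ (arr : List Int) (brr : List Int), Dom_missingNumbers arr brr → Spec_missingNumbers arr brr (missingNumbers arr brr)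

-- ===== LEMMAS AND PROOFS =====

-- A's accumulation loop over b.keys is a filter by the combined condition.
theorem missing_loop_eq_filter (arr brr : List Int) :
    (PySem.Dict.counter brr).keys.foldl (fun missing k =>
      if !((PySem.Dict.counter arr).contains k) then missing ++ [k]
      else if (PySem.Dict.counter brr).getD k 0 > (PySem.Dict.counter arr).getD k 0 then missing ++ [k]
      else missing) [] =
    (PySem.Set.ofList brr).filter
      (fun k => !((PySem.Dict.counter arr).contains k)
        || (PySem.Dict.counter brr).getD k 0 > (PySem.Dict.counter arr).getD k 0) := by
  have hfun : (fun (missing : List Int) (k : Int) =>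
      if !((PySem.Dict.counter arr).contains k) then missing ++ [k]
      else if (PySem.Dict.counter brr).getD k 0 > (PySem.Dict.counter arr).getD k 0 then missing ++ [k]
      else missing) =
      (fun (missing : List Int) (k : Int) =>
        if (!((PySem.Dict.counter arr).contains k)
          || (PySem.Dict.counter brr).getD k 0 > (PySem.Dict.counter arr).getD k 0) then missing ++ [k]
        else missing) := by
    funext m k
    by_cases h1 : (PySem.Dict.counter arr).contains k <;> simp [h1]
  rw [hfun, PySem.List.foldl_append_if_eq_filter, PySem.Dict.keys_counter, List.nil_append]

-- A's branch condition, on a value of brr, is just "fewer copies in arr than in brr"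
theorem cond_iff (arr brr : List Int) (x : Int) (hx : x ∈ brr) :
    ((!((PySem.Dict.counter arr).contains x)
      || (PySem.Dict.counter brr).getD x 0 > (PySem.Dict.counter arr).getD x 0) = true)
    ↔ arr.count x < brr.count x := by
  simp only [PySem.Dict.getD_counter, PySem.Dict.contains_counter, Bool.or_eq_true,
    Bool.not_eq_true', decide_eq_true_eq]
  have hb : 0 < brr.count x := List.count_pos_iff.mpr hx
  constructor
  · rintro (h | h)
    · have : arr.count x = 0 := List.count_eq_zero.mpr (by simpa using h)
      omega
    · exact_mod_cast h
  · intro h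
    right
    exact_mod_cast h

-- pvSkipLt on a sorted list keeps exactly the elements ≥ v
theorem pvSkipLt_eq_filter (v : Int) : ∀ sa : List Int, sa.Pairwise (· ≤ ·) →
    pvSkipLt v sa = sa.filter (fun y => decide (v ≤ y)) := by
  intro sa
  induction sa with
  | nil => intro _; rfl
  | cons x t ih =>
    intro hp
    rw [List.pairwise_cons] at hp
    by_cases h : x < v
    · simp [pvSkipLt, h, ih hp.2]
    · have hvx : v ≤ x := by omega
      have : t.filter (fun y => decide (v ≤ y)) = t :=
        List.filter_eq_self.mpr (fun y hy => by
          have := hp.1 y hy; simp; omega)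
      simp [pvSkipLt, h, hvx, this]

-- pvSkipEq on a sorted list of elements ≥ v keeps exactly the elements > v
theorem pvSkipEq_eq_filter (v : Int) : ∀ t : List Int, t.Pairwise (· ≤ ·) →
    (∀ y ∈ t, v ≤ y) → pvSkipEq v t = t.filter (fun y => decide (v < y)) := by
  intro t
  induction t with
  | nil => intro _ _; rfl
  | cons x t ih =>
    intro hp hge
    rw [List.pairwise_cons] at hp
    by_cases h : x = v
    · subst h
      simp [pvSkipEq, ih hp.2 (fun y hy => hge y (by simp [hy]))]
    · have hvx : v < x := lt_of_le_of_ne (hge x (by simp)) (Ne.symm h)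
      have : t.filter (fun y => decide (v < y)) = t :=
        List.filter_eq_self.mpr (fun y hy => by
          have := hp.1 y hy; simp; omega)
      simp [pvSkipEq, h, hvx, this]

-- pvRunLen on a sorted list of elements ≥ v is the multiplicity of v
theorem pvRunLen_eq_count (v : Int) : ∀ t : List Int, t.Pairwise (· ≤ ·) →
    (∀ y ∈ t, v ≤ y) → pvRunLen v t = t.count v := by
  intro t
  induction t with
  | nil => intro _ _; rfl
  | cons x t ih =>
    intro hp hge
    rw [List.pairwise_cons] at hp
    by_cases h : x = v
    · subst h
      simp [pvRunLen, ih hp.2 (fun y hy => hge y (by simp [hy])), List.count_cons_self]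
    · have hvx : v < x := lt_of_le_of_ne (hge x (by simp)) (Ne.symm h)
      have hnm : v ∉ x :: t := by
        intro hv
        rcases List.mem_cons.mp hv with heq | hv
        · exact h heq.symm
        · have := hp.1 v hv; omega
      simp [pvRunLen, h, List.count_eq_zero.mpr hnm]

-- the grouped scan emits exactly the values of sb with strictly more copies than in sa
theorem pvScan_mem (n : Nat) : ∀ sb sa : List Int, sb.length ≤ n →
    sa.Pairwise (· ≤ ·) → sb.Pairwise (· ≤ ·) →
    ∀ x, x ∈ pvScan sa sb ↔ (x ∈ sb ∧ sa.count x < sb.count x) := by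
  induction n with
  | zero =>
    intro sb sa hlen _ _ x
    interval_cases h : sb.length
    · rw [List.length_eq_zero_iff] at h; subst h; simp [pvScan]
  | succ n ih =>
    intro sb sa hlen hpa hpb x
    match sb with
    | [] => simp [pvScan]
    | v :: t =>
      rw [List.pairwise_cons] at hpb
      have hge : ∀ y ∈ t, v ≤ y := hpb.1
      have hsa1 := pvSkipLt_eq_filter v sa hpa
      have hsa1p : (pvSkipLt v sa).Pairwise (· ≤ ·) := hsa1 ▸ hpa.filter _
      have hsa1ge : ∀ y ∈ pvSkipLt v sa, v ≤ y := by
        intro y hy; rw [hsa1, List.mem_filter] at hy; simpa using hy.2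
      have hca : pvRunLen v (pvSkipLt v sa) = sa.count v := by
        rw [pvRunLen_eq_count v _ hsa1p hsa1ge, hsa1, List.count_filter]
        simp
      have hcb : pvRunLen v t = t.count v := pvRunLen_eq_count v t hpb.2 hge
      have hsb' := pvSkipEq_eq_filter v t hpb.2 hge
      have hsa2 : pvSkipEq v (pvSkipLt v sa) = sa.filter (fun y => decide (v < y)) := by
        rw [pvSkipEq_eq_filter v _ hsa1p hsa1ge, hsa1, List.filter_filter]
        congr 1
        funext y
        simp
        omega
      have hlen' : (pvSkipEq v t).length ≤ n := by
        have := pvSkipEq_length_le v t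
        simp at hlen
        omega
      have hrec := ih (pvSkipEq v t) (pvSkipEq v (pvSkipLt v sa)) hlen'
        (hsa2 ▸ hpa.filter _) (hsb' ▸ hpb.2.filter _)
      rw [show pvScan sa (v :: t) =
        (if pvRunLen v t + 1 > pvRunLen v (pvSkipLt v sa)
          then v :: pvScan (pvSkipEq v (pvSkipLt v sa)) (pvSkipEq v t)
          else pvScan (pvSkipEq v (pvSkipLt v sa)) (pvSkipEq v t)) from by rw [pvScan]]
      have hmem_rec : x ∈ pvScan (pvSkipEq v (pvSkipLt v sa)) (pvSkipEq v t) ↔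
          (v < x ∧ x ∈ t ∧ sa.count x < (v :: t).count x) := by
        rw [hrec x, hsa2, hsb']
        simp only [List.mem_filter, decide_eq_true_eq]
        constructor
        · rintro ⟨⟨hxt, hvx⟩, hcnt⟩
          refine ⟨hvx, hxt, ?_⟩
          rw [List.count_filter (by simpa using hvx), List.count_filter (by simpa using hvx)] at hcnt
          have hvxne : ¬ (v = x) := by omega
          simp [hvxne]
          omega
        · rintro ⟨hvx, hxt, hcnt⟩
          refine ⟨⟨hxt, hvx⟩, ?_⟩
          rw [List.count_filter (by simpa using hvx), List.count_filter (by simpa using hvx)]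
          have hvxne : ¬ (v = x) := by omega
          simp [hvxne] at hcnt
          omega
      by_cases hc : pvRunLen v t + 1 > pvRunLen v (pvSkipLt v sa)
      · simp only [hc, if_pos, List.mem_cons, hmem_rec]
        constructor
        · rintro (rfl | ⟨hvx, hxt, hcnt⟩)
          · refine ⟨by simp, ?_⟩
            rw [hca, hcb] at hc
            simp [List.count_cons_self]
            omega
          · exact ⟨by simp [hxt], hcnt⟩
        · rintro ⟨hmem, hcnt⟩
          rcases hmem with rfl | hxt
          · left; rfl
          · by_cases hxv : x = v
            · left; exact hxv
            · right
              exact ⟨lt_of_le_of_ne (hge x hxt) (Ne.symm hxv), hxt, hcnt⟩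
      · rw [if_neg hc, hmem_rec]
        rw [hca, hcb] at hc
        constructor
        · rintro ⟨hvx, hxt, hcnt⟩
          exact ⟨by simp [hxt], hcnt⟩
        · rintro ⟨hmem, hcnt⟩
          rcases List.mem_cons.mp hmem with heq | hxt
          · exfalso
            subst heq
            simp [List.count_cons_self] at hcnt
            omega
          · by_cases hxv : x = v
            · exfalso; subst hxv
              simp [List.count_cons_self] at hcnt
              omega
            · exact ⟨lt_of_le_of_ne (hge x hxt) (Ne.symm hxv), hxt, hcnt⟩

-- the scan's output is strictly increasing
theorem pvScan_pairwise (n : Nat) : ∀ sb sa : List Int, sb.length ≤ n →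
    sa.Pairwise (· ≤ ·) → sb.Pairwise (· ≤ ·) →
    (pvScan sa sb).Pairwise (· < ·) := by
  induction n with
  | zero =>
    intro sb sa hlen _ _
    interval_cases h : sb.length
    · rw [List.length_eq_zero_iff] at h; subst h; simp [pvScan]
  | succ n ih =>
    intro sb sa hlen hpa hpb
    match sb with
    | [] => simp [pvScan]
    | v :: t =>
      rw [List.pairwise_cons] at hpb
      have hge : ∀ y ∈ t, v ≤ y := hpb.1
      have hsa1 := pvSkipLt_eq_filter v sa hpa
      have hsa1p : (pvSkipLt v sa).Pairwise (· ≤ ·) := hsa1 ▸ hpa.filter _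
      have hsa1ge : ∀ y ∈ pvSkipLt v sa, v ≤ y := by
        intro y hy; rw [hsa1, List.mem_filter] at hy; simpa using hy.2
      have hsb' := pvSkipEq_eq_filter v t hpb.2 hge
      have hsa2p : (pvSkipEq v (pvSkipLt v sa)).Pairwise (· ≤ ·) :=
        (pvSkipEq_eq_filter v _ hsa1p hsa1ge) ▸ hsa1p.filter _
      have hsb'p : (pvSkipEq v t).Pairwise (· ≤ ·) := hsb' ▸ hpb.2.filter _
      have hlen' : (pvSkipEq v t).length ≤ n := by
        have := pvSkipEq_length_le v t
        simp at hlen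
        omega
      have hrest := ih (pvSkipEq v t) (pvSkipEq v (pvSkipLt v sa)) hlen' hsa2p hsb'p
      have hrestgt : ∀ y ∈ pvScan (pvSkipEq v (pvSkipLt v sa)) (pvSkipEq v t), v < y := by
        intro y hy
        rw [pvScan_mem n _ _ hlen' hsa2p hsb'p] at hy
        have := hy.1
        rw [hsb', List.mem_filter] at this
        simpa using this.2
      rw [show pvScan sa (v :: t) =
        (if pvRunLen v t + 1 > pvRunLen v (pvSkipLt v sa)
          then v :: pvScan (pvSkipEq v (pvSkipLt v sa)) (pvSkipEq v t)
          else pvScan (pvSkipEq v (pvSkipLt v sa)) (pvSkipEq v t)) from by rw [pvScan]]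
      by_cases hc : pvRunLen v t + 1 > pvRunLen v (pvSkipLt v sa)
      · rw [if_pos hc, List.pairwise_cons]
        exact ⟨hrestgt, hrest⟩
      · rw [if_neg hc]; exact hrest

-- ===== VERDICT (by name: the statement is the Claim_ definition above) =====
theorem missingNumbers_spec : Claim_equal_missingNumbers := by
  intro arr brr _
  unfold Spec_missingNumbers missingNumbers missingNumbers_alt
  simp only [missing_loop_eq_filter]
  have hpa : (PySem.List.sorted arr (fun x => x) false).Pairwise (· ≤ ·) :=
    PySem.List.sorted_pairwise arr (fun x => x)
  have hpb : (PySem.List.sorted brr (fun x => x) false).Pairwise (· ≤ ·) :=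
    PySem.List.sorted_pairwise brr (fun x => x)
  have hcnta : ∀ x : Int, (PySem.List.sorted arr (fun x => x) false).count x = arr.count x :=
    fun x => (PySem.List.sorted_perm arr (fun x => x) false).count_eq x
  have hcntb : ∀ x : Int, (PySem.List.sorted brr (fun x => x) false).count x = brr.count x :=
    fun x => (PySem.List.sorted_perm brr (fun x => x) false).count_eq x
  have hmemb : ∀ x : Int, x ∈ PySem.List.sorted brr (fun x => x) false ↔ x ∈ brr :=
    fun x => PySem.List.mem_sorted brr (fun x => x) false x
  have hlt := pvScan_pairwise (PySem.List.sorted brr (fun x => x) false).length _ _ le_rfl hpa hpb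
  apply PySem.List.sorted_eq_of_perm_of_pairwise_lt
  · -- the scan output is a rearrangement of A's missing list
    apply (List.perm_ext_iff_of_nodup (hlt.imp ne_of_lt)
      ((PySem.Set.nodup_ofList brr).filter _)).mpr
    intro x
    rw [pvScan_mem (PySem.List.sorted brr (fun x => x) false).length _ _ le_rfl hpa hpb x]
    rw [hcnta, hcntb, hmemb, List.mem_filter, PySem.Set.mem_ofList]
    constructor
    · rintro ⟨hx, hcnt⟩
      exact ⟨hx, (cond_iff arr brr x hx).mpr hcnt⟩
    · rintro ⟨hx, hcond⟩
      exact ⟨hx, (cond_iff arr brr x hx).mp hcond⟩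
  · exact hlt
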